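-- pv_equiv track=rewrite | github.com/ladis8/B3B33ALP | LECTURES/13_10_1.py | biggestposloupnost
-- ===== SOURCE A (Python) =====
-- def biggestposloupnost (list):
--
--     maxlength =maxsum =0
--     first  = 0
--     last = 1
--     sum =list [first]
--     length = 1
--
--     while last < len(list):
--         if list [last] > list [last-1]:
--             sum+=list [last]
--             length +=1
--         else:
--             if length > maxlength:
--                 maxlength = length
--                 maxsum = sum
--             elif length == maxlength and sum > maxsum:
--                 maxsum = sum
--
--             sum =list [last]
--             first = last
--             length =1
--         last +=1
--
--     if length > maxlength:
--         maxlength = length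
--         maxsum = sum
--     elif length == maxlength and sum > maxsum:
--         maxsum = sum
--
--     return maxsum, maxlength
-- ===== SOURCE B (Python) =====
-- def biggestposloupnost(list):
--     # Build the maximal strictly-increasing runs as (length, sum) pairs, then reduce.
--     runs = []
--     cur_sum = list[0]
--     cur_len = 1
--     for i in range(1, len(list)):
--         if list[i] > list[i - 1]:
--             cur_sum += list[i]
--             cur_len += 1
--         else:
--             runs.append((cur_len, cur_sum))
--             cur_sum = list[i]
--             cur_len = 1
--     runs.append((cur_len, cur_sum))
--     maxlen = max(l for l, s in runs)
--     maxsum = max(s for l, s in runs if l == maxlen)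
--     return maxsum, maxlen
-- ===== Notes on version B (the rewrite author's own statement) =====
-- stated objective: simpler
-- what changed: Replaces A's single-pass best-so-far accumulator with its duplicated end-of-loop update block by a two-phase decomposition: segment the list into maximal strictly-increasing runs as (length, sum) pairs, then take the max length and the max sum among runs of that length.
import Mathlib
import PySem

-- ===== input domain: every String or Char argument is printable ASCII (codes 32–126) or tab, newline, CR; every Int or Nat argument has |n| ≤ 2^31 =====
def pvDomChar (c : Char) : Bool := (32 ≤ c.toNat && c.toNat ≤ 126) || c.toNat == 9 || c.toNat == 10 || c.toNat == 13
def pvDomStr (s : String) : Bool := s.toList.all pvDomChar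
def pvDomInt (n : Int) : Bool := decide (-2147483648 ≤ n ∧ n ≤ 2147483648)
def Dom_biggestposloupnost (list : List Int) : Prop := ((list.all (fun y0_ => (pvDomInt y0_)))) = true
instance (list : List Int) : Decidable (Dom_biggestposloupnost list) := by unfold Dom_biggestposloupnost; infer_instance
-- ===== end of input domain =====

-- B replaces A's single-pass best-so-far accumulator (with its duplicated tail update) by a
-- simpler two-phase decomposition: segment into maximal strictly-increasing runs, then reduce.

-- ===== PORT A =====
-- A's while loop over `last`; walking the tail structurally, `prev` is list[last-1].
def aLoop (prev maxlength maxsum sum length : Int) : List Int → Int × Int × Int × Int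
  | [] => (maxlength, maxsum, sum, length)
  | x :: rest =>
    if x > prev then
      aLoop x maxlength maxsum (sum + x) (length + 1) rest
    else
      if length > maxlength then
        aLoop x length sum x 1 rest
      else if length = maxlength ∧ sum > maxsum then
        aLoop x maxlength sum x 1 rest
      else
        aLoop x maxlength maxsum x 1 rest

def biggestposloupnost (list : List Int) : Int × Int :=
  match list with
  | [] => (0, 0)  -- Python: list[0] raises IndexError; excluded by Pre_
  | x :: rest =>
    let t := aLoop x 0 0 x 1 rest
    let maxlength := t.1
    let maxsum := t.2.1
    let sum := t.2.2.1
    let length := t.2.2.2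
    if length > maxlength then (sum, length)
    else if length = maxlength ∧ sum > maxsum then (sum, maxlength)
    else (maxsum, maxlength)

-- ===== PORT B =====
-- the for loop of Source B, building the (length, sum) pair of each maximal increasing run
def bRuns (prev curLen curSum : Int) : List Int → List (Int × Int)
  | [] => [(curLen, curSum)]
  | x :: rest =>
    if x > prev then bRuns x (curLen + 1) (curSum + x) rest
    else (curLen, curSum) :: bRuns x 1 x rest

def biggestposloupnost_alt (list : List Int) : Int × Int :=
  match list with
  | [] => (0, 0)  -- Python: list[0] raises IndexError; excluded by Pre_
  | x :: rest =>
    let runs := bRuns x 1 x rest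
    -- runs is never empty, so the .getD defaults are never used (Python's max receives a nonempty sequence)
    let maxlen := (PySem.List.max? (runs.map Prod.fst) (fun y => y)).getD 0
    let maxsum := (PySem.List.max? ((runs.filter (fun p => p.1 == maxlen)).map Prod.snd) (fun y => y)).getD 0
    (maxsum, maxlen)

-- ===== PRECONDITION & SPEC =====
-- Pre_ excludes only the empty list, on which Python A raises IndexError (list[0]).
def Pre_biggestposloupnost (list : List Int) : Prop := list ≠ []
instance (list : List Int) : Decidable (Pre_biggestposloupnost list) := by
  unfold Pre_biggestposloupnost; infer_instance
def pvWitness_biggestposloupnost : List Int := [1, 2, 0]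

def Spec_biggestposloupnost (list : List Int) (out : Int × Int) : Prop := out = biggestposloupnost_alt list
instance (list : List Int) (out : Int × Int) : Decidable (Spec_biggestposloupnost list out) := by
  unfold Spec_biggestposloupnost; infer_instance

-- ===== CLAIM (what is proved, stated in full; the proofs are below) =====
def Claim_equal_biggestposloupnost : Prop := ∀ (list : List Int), Dom_biggestposloupnost list → Pre_biggestposloupnost list → Spec_biggestposloupnost list (biggestposloupnost list)

-- ===== LEMMAS AND PROOFS =====

-- the update A performs at each run boundary (and once more after the loop), as a fold step
def pvStep (p q : Int × Int) : Int × Int :=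
  if q.1 > p.1 then q else if q.1 = p.1 ∧ q.2 > p.2 then (p.1, q.2) else p

lemma aLoop_bridge (xs : List Int) : ∀ prev ml ms s l : Int,
    pvStep ((aLoop prev ml ms s l xs).1, (aLoop prev ml ms s l xs).2.1)
           ((aLoop prev ml ms s l xs).2.2.2, (aLoop prev ml ms s l xs).2.2.1)
      = List.foldl pvStep (ml, ms) (bRuns prev l s xs) := by
  induction xs with
  | nil => intro prev ml ms s l; simp [aLoop, bRuns, List.foldl]
  | cons x rest ih =>
    intro prev ml ms s l
    by_cases h : x > prev
    · simp only [aLoop, bRuns, if_pos h]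
      exact ih x ml ms (s + x) (l + 1)
    · simp only [aLoop, bRuns, if_neg h, List.foldl]
      by_cases h1 : l > ml
      · rw [if_pos h1, show pvStep (ml, ms) (l, s) = (l, s) from by simp [pvStep, h1]]
        exact ih x l s x 1
      · rw [if_neg h1]
        by_cases h2 : l = ml ∧ s > ms
        · rw [if_pos h2, show pvStep (ml, ms) (l, s) = (ml, s) from by simp [pvStep, h2.1, h2.2]]
          exact ih x ml s x 1
        · rw [if_neg h2, show pvStep (ml, ms) (l, s) = (ml, ms) from by simp [pvStep, h1, h2]]
          exact ih x ml ms x 1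

lemma bRuns_head (xs : List Int) : ∀ prev l s : Int,
    ∃ p rs, bRuns prev l s xs = p :: rs ∧ l ≤ p.1 := by
  induction xs with
  | nil => intro prev l s; exact ⟨(l, s), [], rfl, le_refl _⟩
  | cons x rest ih =>
    intro prev l s
    by_cases h : x > prev
    · obtain ⟨p, rs, hp, hl⟩ := ih x (l + 1) (s + x)
      exact ⟨p, rs, by simp [bRuns, h, hp], by omega⟩
    · exact ⟨(l, s), bRuns x 1 x rest, by simp [bRuns, h], le_refl _⟩

lemma foldl_step_fst (rs : List (Int × Int)) : ∀ r : Int × Int,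
    (List.foldl pvStep r rs).1 = (rs.map Prod.fst).foldl max r.1 := by
  induction rs with
  | nil => intro r; rfl
  | cons q rs ih =>
    intro r
    have hs : (pvStep r q).1 = max r.1 q.1 := by
      simp only [pvStep]; split_ifs with h1 h2
      · omega
      · exact (by omega : (r.1, q.2).1 = max r.1 q.1)
      · omega
    simp only [List.foldl, List.map, ih, hs]

lemma foldl_step_snd (rs : List (Int × Int)) : ∀ r : Int × Int,
    PySem.List.max?
      (((r :: rs).filter (fun p => p.1 == (List.foldl pvStep r rs).1)).map Prod.snd)
      (fun y => y) = some (List.foldl pvStep r rs).2 := by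
  induction rs with
  | nil =>
    intro r
    simp [List.foldl, List.filter, PySem.List.max?_id_cons]
  | cons q rs ih =>
    intro r
    have goal1 : List.foldl pvStep r (q :: rs) = List.foldl pvStep (pvStep r q) rs := rfl
    rw [goal1]
    have ihq := ih (pvStep r q)
    have hfst : (pvStep r q).1 = max r.1 q.1 := by
      simp only [pvStep]; split_ifs with h1 h2
      · omega
      · exact (by omega : (r.1, q.2).1 = max r.1 q.1)
      · omega
    have hrM : max r.1 q.1 ≤ (List.foldl pvStep (pvStep r q) rs).1 := by
      rw [foldl_step_fst, hfst]
      exact (PySem.List.le_foldl_max _ _).1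
    generalize hE : List.foldl pvStep (pvStep r q) rs = E at ihq hrM ⊢
    by_cases hc1 : q.1 > r.1
    · -- pvStep r q = q : r is dropped by the filter (r.1 < q.1 ≤ E.1)
      have hq : pvStep r q = q := by simp [pvStep, hc1]
      rw [hq] at ihq
      have hrne : (r.1 == E.1) = false := by
        simp only [beq_eq_false_iff_ne]; omega
      rw [show ((r :: q :: rs).filter (fun p => p.1 == E.1))
            = ((q :: rs).filter (fun p => p.1 == E.1)) from by simp [List.filter, hrne]]
      exact ihq
    · by_cases hc2 : q.1 = r.1 ∧ q.2 > r.2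
      · have hq : pvStep r q = (r.1, q.2) := by simp [pvStep, hc2.1, hc2.2]
        rw [hq] at ihq
        by_cases hM1 : r.1 = E.1
        · have hrq : (r.1 == E.1) = true := by simp [hM1]
          have hqq : (q.1 == E.1) = true := by simp [hc2.1, hM1]
          rw [show (((r.1, q.2) :: rs).filter (fun p => p.1 == E.1)).map Prod.snd
                = q.2 :: (rs.filter (fun p => p.1 == E.1)).map Prod.snd from by
              simp [List.filter, hrq], PySem.List.max?_id_cons] at ihq
          rw [show ((r :: q :: rs).filter (fun p => p.1 == E.1)).map Prod.snd
                = r.2 :: q.2 :: (rs.filter (fun p => p.1 == E.1)).map Prod.snd from by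
              simp [List.filter, hrq, hqq], PySem.List.max?_id_cons]
          have hswap : List.foldl max r.2 (q.2 :: ((rs.filter (fun p => p.1 == E.1)).map Prod.snd))
              = List.foldl max q.2 ((rs.filter (fun p => p.1 == E.1)).map Prod.snd) := by
            simp only [List.foldl]
            rw [show max r.2 q.2 = q.2 from by omega]
          rw [hswap]; exact ihq
        · have hrne : (r.1 == E.1) = false := by simp only [beq_eq_false_iff_ne]; exact hM1
          have hqne : (q.1 == E.1) = false := by
            simp only [beq_eq_false_iff_ne]; rw [hc2.1]; exact hM1
          rw [show (((r.1, q.2) :: rs).filter (fun p => p.1 == E.1))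
                = rs.filter (fun p => p.1 == E.1) from by simp [List.filter, hrne]] at ihq
          rw [show ((r :: q :: rs).filter (fun p => p.1 == E.1))
                = rs.filter (fun p => p.1 == E.1) from by simp [List.filter, hrne, hqne]]
          exact ihq
      · -- pvStep r q = r : q is redundant
        have hq : pvStep r q = r := by simp only [pvStep, if_neg hc1, if_neg hc2]
        rw [hq] at ihq
        by_cases hqM : q.1 = E.1
        · -- q.1 ≤ r.1 ≤ E.1 = q.1 forces q.1 = r.1, hence q.2 ≤ r.2
          have hr1 : r.1 = E.1 := by omega
          have hq2 : q.2 ≤ r.2 := by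
            by_cases h' : q.1 = r.1
            · by_contra hgt; exact hc2 ⟨h', by omega⟩
            · omega
          have hrq : (r.1 == E.1) = true := by simp [hr1]
          have hqq : (q.1 == E.1) = true := by simp [hqM]
          rw [show ((r :: rs).filter (fun p => p.1 == E.1)).map Prod.snd
                = r.2 :: (rs.filter (fun p => p.1 == E.1)).map Prod.snd from by
              simp [List.filter, hrq], PySem.List.max?_id_cons] at ihq
          rw [show ((r :: q :: rs).filter (fun p => p.1 == E.1)).map Prod.snd
                = r.2 :: q.2 :: (rs.filter (fun p => p.1 == E.1)).map Prod.snd from by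
              simp [List.filter, hrq, hqq], PySem.List.max?_id_cons]
          have habs : List.foldl max r.2 (q.2 :: ((rs.filter (fun p => p.1 == E.1)).map Prod.snd))
              = List.foldl max r.2 ((rs.filter (fun p => p.1 == E.1)).map Prod.snd) := by
            simp only [List.foldl]
            rw [show max r.2 q.2 = r.2 from by omega]
          rw [habs]; exact ihq
        · have hqne : (q.1 == E.1) = false := by simp only [beq_eq_false_iff_ne]; exact hqM
          rw [show ((r :: q :: rs).filter (fun p => p.1 == E.1))
                = ((r :: rs).filter (fun p => p.1 == E.1)) from by simp [List.filter, hqne]]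
          exact ihq

-- ===== VERDICT (by name: the statement is the Claim_ definition above) =====
theorem biggestposloupnost_spec : Claim_equal_biggestposloupnost := by
  intro list _ hpre
  unfold Spec_biggestposloupnost
  match list with
  | [] => exact absurd rfl hpre
  | x :: rest =>
    obtain ⟨p, rs, hruns, hl⟩ := bRuns_head rest x 1 x
    have hbridge := aLoop_bridge rest x 0 0 x 1
    simp only [hruns] at hbridge
    have hstep0 : pvStep (0, 0) p = p := by
      simp [pvStep, show ((0, 0) : Int × Int).1 < p.1 from by omega]
    have hfold : List.foldl pvStep ((0 : Int), (0 : Int)) (p :: rs) = List.foldl pvStep p rs := by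
      simp [List.foldl, hstep0]
    rw [hfold] at hbridge
    have hfst := foldl_step_fst rs p
    have hsnd := foldl_step_snd rs p
    -- unfold both sides
    show biggestposloupnost (x :: rest) = biggestposloupnost_alt (x :: rest)
    simp only [biggestposloupnost, biggestposloupnost_alt, hruns]
    -- B's maxlen
    have hmaxlen :
        (PySem.List.max? ((p :: rs).map Prod.fst) (fun y => y)).getD 0
          = (List.foldl pvStep p rs).1 := by
      rw [List.map_cons, PySem.List.max?_id_cons, Option.getD_some, hfst]
    rw [hmaxlen]
    rw [hsnd]
    -- A's side: the final if block is pvStep applied to aLoop's result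
    have hA :
        (fun t : Int × Int × Int × Int =>
          if t.2.2.2 > t.1 then (t.2.2.1, t.2.2.2)
          else if t.2.2.2 = t.1 ∧ t.2.2.1 > t.2.1 then (t.2.2.1, t.1)
          else (t.2.1, t.1)) (aLoop x 0 0 x 1 rest)
          = ((List.foldl pvStep p rs).2, (List.foldl pvStep p rs).1) := by
      rw [← hbridge]
      simp only [pvStep]
      split_ifs with h1 h2 <;> rfl
    simpa using hA
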